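-- pv_equiv track=rewrite | github.com/REDWOLF925/vk_ds | other/data_preprocessing.py | outflow_max_val
-- ===== SOURCE A (Python) =====
-- def outflow_max_val(lst):
--     ans = 0
--     s = 0
--     for i in range(1, len(lst)):
--         diff = lst[i] - lst[i - 1]
--         if diff < 0:
--             s -= diff
--             ans = max(ans, s)
--         else:
--             s = 0
--     return ans
-- ===== SOURCE B (Python) =====
-- def outflow_max_val(lst):
--     # Phase 1: one pass splitting the sequence into maximal strictly-decreasing
--     # runs, kept as (start_value, end_value) segments.
--     segments = []
--     for x in lst:
--         if segments and x < segments[-1][1]: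
--             segments[-1] = (segments[-1][0], x)
--         else:
--             segments.append((x, x))
--     # Phase 2: a run's accumulated drop telescopes to start - end; max, baseline 0.
--     return max([0] + [start - end for start, end in segments])
-- ===== Notes on version B (the rewrite author's own statement) =====
-- stated objective: alternative
-- what changed: Replaces the per-step running-sum-with-reset loop by a two-phase pass: first segment the list into maximal strictly-decreasing runs recording each run's start and end value, then take the maximum of the telescoped drops (start - end) over the segments with baseline 0.
import Mathlib
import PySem

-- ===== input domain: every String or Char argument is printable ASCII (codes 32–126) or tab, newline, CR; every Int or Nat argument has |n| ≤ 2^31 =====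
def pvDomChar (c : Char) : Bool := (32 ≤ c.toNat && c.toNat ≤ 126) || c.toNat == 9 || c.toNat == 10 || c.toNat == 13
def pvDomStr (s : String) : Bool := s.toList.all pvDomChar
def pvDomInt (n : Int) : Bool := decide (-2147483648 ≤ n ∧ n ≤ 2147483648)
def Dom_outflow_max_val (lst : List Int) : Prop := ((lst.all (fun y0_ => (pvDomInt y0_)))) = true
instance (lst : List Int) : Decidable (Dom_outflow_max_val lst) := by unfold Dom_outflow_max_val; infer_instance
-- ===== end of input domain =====

-- B re-implements the running-drop loop as a two-phase pass: split into maximal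
-- strictly-decreasing runs, then take the max of (run start - run end) over the runs
-- (objective: alternative decomposition, same cost).


-- ===== PORT A =====
-- for i in range(1, len(lst)) reading lst[i] and lst[i-1]; indices are always in
-- range, so pyGetD with default 0 is exact here.  State = (ans, s).
def outflow_max_val (lst : List Int) : Int :=
  ((PySem.List.pyRange 1 (PySem.List.len lst) 1).foldl
    (fun (st : Int × Int) i =>
      let diff := PySem.List.pyGetD lst i 0 - PySem.List.pyGetD lst (i - 1) 0
      if diff < 0 then
        let s := st.2 - diff
        (max st.1 s, s)
      else (st.1, 0)) (0, 0)).1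

-- ===== PORT B =====
-- loop body of Source B: extend the current run (segments[-1] = (start, x)) or open a new one
def segStep (segments : List (Int × Int)) (x : Int) : List (Int × Int) :=
  match segments.getLast? with
  | some p => if x < p.2 then segments.dropLast ++ [(p.1, x)] else segments ++ [(x, x)]
  | none => segments ++ [(x, x)]

-- max([0] + [start - end for start, end in segments])
def outflow_max_val_alt (lst : List Int) : Int :=
  match PySem.List.max? ((0 : Int) :: (lst.foldl segStep []).map (fun p => p.1 - p.2)) (fun y => y) with
  | some m => m
  | none => 0

-- ===== PRECONDITION & SPEC =====
def Spec_outflow_max_val (lst : List Int) (out : Int) : Prop := out = outflow_max_val_alt lst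
instance (lst : List Int) (out : Int) : Decidable (Spec_outflow_max_val lst out) := by unfold Spec_outflow_max_val; infer_instance

-- ===== CLAIM (what is proved, stated in full; the proofs are below) =====
def Claim_equal_outflow_max_val : Prop := ∀ (lst : List Int), Dom_outflow_max_val lst → Spec_outflow_max_val lst (outflow_max_val lst)

-- ===== LEMMAS AND PROOFS =====

-- structural version of A's indexed loop: state (ans, s), previous element carried along
def aLoop : Int → Int × Int → List Int → Int × Int
  | _, st, [] => st
  | prev, st, y :: ys =>
      aLoop y (if y - prev < 0 then (max st.1 (st.2 - (y - prev)), st.2 - (y - prev)) else (st.1, 0)) ys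

-- structural version of B's segmentation
def runsGo : Int → Int → List Int → List (Int × Int)
  | start, prev, [] => [(start, prev)]
  | start, prev, y :: ys =>
      if y < prev then runsGo start y ys else (start, prev) :: runsGo y y ys

def runs : List Int → List (Int × Int)
  | [] => []
  | x :: xs => runsGo x x xs

theorem bridgeA (lst : List Int) :
    ∀ (i : Nat) (st : Int × Int), 1 ≤ i →
    ((PySem.List.pyRange i lst.length 1).foldl
      (fun (st : Int × Int) j =>
        let diff := PySem.List.pyGetD lst j 0 - PySem.List.pyGetD lst (j - 1) 0
        if diff < 0 then
          let s := st.2 - diff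
          (max st.1 s, s)
        else (st.1, 0)) st)
    = aLoop (lst.getD (i - 1) 0) st (lst.drop i) := by
  intro i st hi
  induction hn : lst.length - i generalizing i st with
  | zero =>
      have hge : lst.length ≤ i := by omega
      rw [PySem.List.pyRange_one_eq_nil (by exact_mod_cast hge), List.drop_eq_nil_of_le hge]
      rfl
  | succ n ih =>
      have hlt : i < lst.length := by omega
      rw [PySem.List.pyRange_one_cons (by exact_mod_cast hlt)]
      rw [List.foldl_cons]
      have hdrop : lst.drop i = lst[i] :: lst.drop (i + 1) := List.drop_eq_getElem_cons hlt
      rw [hdrop]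
      have hcast : ((i : Int) + 1) = ((i + 1 : Nat) : Int) := by push_cast; ring
      have hsub : ((i : Int) - 1) = ((i - 1 : Nat) : Int) := by omega
      rw [hcast, hsub, ih (i + 1) _ (by omega) (by omega)]
      simp only [PySem.List.pyGetD_natCast, aLoop]
      have h1 : lst.getD i 0 = lst[i] := List.getD_eq_getElem lst 0 hlt
      have h2 : (i + 1) - 1 = i := by omega
      rw [h1, h2]
      rw [h1]

theorem head_runsGo : ∀ (xs : List Int) (start prev : Int),
    ∃ e t, runsGo start prev xs = (start, e) :: t ∧ e ≤ prev := by
  intro xs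
  induction xs with
  | nil => intro start prev; exact ⟨prev, [], rfl, le_refl _⟩
  | cons y ys ih =>
      intro start prev
      by_cases h : y < prev
      · obtain ⟨e, t, he, hle⟩ := ih start y
        exact ⟨e, t, by simp [runsGo, h, he], by omega⟩
      · exact ⟨prev, runsGo y y ys, by simp [runsGo, h], le_refl _⟩

theorem foldl_max_shift : ∀ (L : List Int) (a c : Int),
    L.foldl max (max a c) = max (L.foldl max a) c := by
  intro L
  induction L with
  | nil => intro a c; rfl
  | cons y t ih =>
      intro a c
      simp only [List.foldl_cons]
      have : max (max a c) y = max (max a y) c := by omega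
      rw [this, ih]

theorem mainLemma : ∀ (xs : List Int) (start prev ans s : Int),
    s = start - prev → 0 ≤ s → 0 ≤ ans → s ≤ ans →
    (aLoop prev (ans, s) xs).1
      = ((runsGo start prev xs).map (fun p => p.1 - p.2)).foldl max ans := by
  intro xs
  induction xs with
  | nil =>
      intro start prev ans s hs _ _ hsa
      simp [aLoop, runsGo]
      omega
  | cons y ys ih =>
      intro start prev ans s hs hs0 ha0 hsa
      by_cases h : y - prev < 0
      · have hstep : aLoop prev (ans, s) (y :: ys)
            = aLoop y (max ans (s - (y - prev)), s - (y - prev)) ys := by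
          simp [aLoop, h]
        have hrg : runsGo start prev (y :: ys) = runsGo start y ys := by
          simp [runsGo]; omega
        rw [hstep, hrg]
        rw [ih start y (max ans (s - (y - prev))) (s - (y - prev))
              (by omega) (by omega) (by omega) (by omega)]
        obtain ⟨e, t, he, hle⟩ := head_runsGo ys start y
        rw [foldl_max_shift]
        have hmem : (start - e) ∈ (runsGo start y ys).map (fun p => p.1 - p.2) := by
          rw [he]; simp
        have hbig := (PySem.List.le_foldl_max ((runsGo start y ys).map (fun p => p.1 - p.2)) ans).2
          _ hmem
        omega
      · have hstep : aLoop prev (ans, s) (y :: ys) = aLoop y (ans, 0) ys := by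
          simp [aLoop, h]
        have hrg : runsGo start prev (y :: ys) = (start, prev) :: runsGo y y ys := by
          simp [runsGo]; omega
        rw [hstep, hrg]
        simp only [List.map_cons, List.foldl_cons]
        have : max ans (start - prev) = ans := by omega
        rw [this, ih y y ans 0 (by ring) (le_refl 0) ha0 ha0]

-- B's fold builds exactly the structural run segmentation
theorem runsGo_ne_nil (xs : List Int) (start prev : Int) : runsGo start prev xs ≠ [] := by
  obtain ⟨e, t, he, -⟩ := head_runsGo xs start prev
  simp [he]

theorem segStep_cons (a : Int × Int) (L : List (Int × Int)) (x : Int) (hL : L ≠ []) :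
    segStep (a :: L) x = a :: segStep L x := by
  obtain ⟨b, L', rfl⟩ := List.exists_cons_of_ne_nil hL
  simp only [segStep, List.getLast?_cons_cons, List.dropLast_cons₂, List.cons_append]
  split
  · split <;> rfl
  · rfl

theorem runsGo_snoc : ∀ (ys : List Int) (start prev x : Int),
    runsGo start prev (ys ++ [x]) = segStep (runsGo start prev ys) x := by
  intro ys
  induction ys with
  | nil =>
      intro start prev x
      simp only [List.nil_append, runsGo, segStep]
      by_cases h : x < prev
      · simp [h]
      · simp [h]
  | cons y ys ih =>
      intro start prev x
      simp only [List.cons_append, runsGo]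
      by_cases h : y < prev
      · simp only [if_pos h]
        exact ih start y x
      · simp only [if_neg h]
        rw [ih y y x, segStep_cons _ _ _ (runsGo_ne_nil ys y y)]

theorem runs_snoc (l : List Int) (x : Int) : runs (l ++ [x]) = segStep (runs l) x := by
  cases l with
  | nil => rfl
  | cons h t =>
      show runsGo h h (t ++ [x]) = segStep (runsGo h h t) x
      exact runsGo_snoc t h h x

theorem foldl_segStep_eq_runs (l : List Int) : l.foldl segStep [] = runs l := by
  induction l using List.reverseRecOn with
  | nil => rfl
  | append_singleton l x ih => rw [List.foldl_append, List.foldl_cons, List.foldl_nil, ih, runs_snoc]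

theorem alt_eq_foldl (lst : List Int) :
    outflow_max_val_alt lst = ((runs lst).map (fun p => p.1 - p.2)).foldl max 0 := by
  unfold outflow_max_val_alt
  rw [foldl_segStep_eq_runs, PySem.List.max?_id_cons]

-- ===== VERDICT (by name: the statement is the Claim_ definition above) =====
theorem outflow_max_val_spec : Claim_equal_outflow_max_val := by
  intro lst _
  unfold Spec_outflow_max_val
  rw [alt_eq_foldl]
  cases lst with
  | nil =>
      simp [outflow_max_val, runs, PySem.List.pyRange_one_eq_nil]
  | cons x xs =>
      unfold outflow_max_val
      rw [PySem.List.len_eq]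
      have hb := bridgeA (x :: xs) 1 (0, 0) (le_refl 1)
      simp only [Nat.cast_one] at hb
      rw [hb]
      simp only [List.drop_one, List.tail_cons]
      have hget : (x :: xs).getD (1 - 1) 0 = x := rfl
      rw [hget]
      exact mainLemma xs x x 0 0 (by ring) (le_refl 0) (le_refl 0) (le_refl 0)
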